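-- pv_equiv track=rewrite | github.com/esun-ai/phonetic_mlm | src/dataset.py | _obtain_typo_flags
-- ===== SOURCE A (Python) =====
-- def _obtain_typo_flags(typo, text2token):
--     typo_flags = []
--     for char_position, token_index in enumerate(text2token):
--         if token_index is None:
--             continue
--
--         typo_flag = 0
--         for typo_word, correct_word, start, end in typo:
--             if start <= char_position < end:
--                 typo_flag = 1
--                 break
--
--         if token_index >= len(typo_flags):  # append是參照token level而非char level
--             typo_flags.append(typo_flag)
--     return typo_flags
-- ===== SOURCE B (Python) =====
-- def _obtain_typo_flags(typo, text2token):
--     # Difference array over typo intervals + single running-coverage sweep: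
--     # O(len(text2token) + len(typo)) instead of O(len(text2token) * len(typo)).
--     n = len(text2token)
--     diff = [0] * (n + 1)
--     for _typo_word, _correct_word, start, end in typo:
--         lo = max(start, 0)
--         hi = min(end, n)
--         if lo < hi:
--             diff[lo] += 1
--             diff[hi] -= 1
--     typo_flags = []
--     cover = 0
--     for pos, token_index in enumerate(text2token):
--         cover += diff[pos]
--         if token_index is not None and token_index >= len(typo_flags):
--             typo_flags.append(1 if cover > 0 else 0)
--     return typo_flags
-- ===== Notes on version B (the rewrite author's own statement) =====
-- stated objective: faster
-- what changed: Replaces the per-character scan over all typo intervals with a clamped difference array and one running-coverage sweep over the text.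
import Mathlib
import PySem

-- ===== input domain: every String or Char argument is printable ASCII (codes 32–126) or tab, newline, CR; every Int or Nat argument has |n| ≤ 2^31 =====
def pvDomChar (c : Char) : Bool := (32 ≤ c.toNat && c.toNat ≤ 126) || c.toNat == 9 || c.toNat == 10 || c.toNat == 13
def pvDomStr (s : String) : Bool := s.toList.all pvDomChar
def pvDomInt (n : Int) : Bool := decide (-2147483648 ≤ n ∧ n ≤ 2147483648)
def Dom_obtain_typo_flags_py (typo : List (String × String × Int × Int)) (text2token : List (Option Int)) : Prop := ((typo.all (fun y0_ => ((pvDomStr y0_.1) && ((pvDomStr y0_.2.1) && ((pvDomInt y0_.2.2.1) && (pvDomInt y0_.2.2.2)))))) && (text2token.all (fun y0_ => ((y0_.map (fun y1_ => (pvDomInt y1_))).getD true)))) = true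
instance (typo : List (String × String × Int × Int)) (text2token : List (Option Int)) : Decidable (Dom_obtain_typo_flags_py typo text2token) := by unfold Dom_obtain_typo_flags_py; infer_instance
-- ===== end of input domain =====

-- B replaces A's per-character scan of all typo intervals by a clamped difference array
-- and one running-coverage sweep (asymptotically faster; same return value).



-- ===== PORT A =====
-- A's inner for-loop with break: first interval containing pos sets the flag to 1.
def pvAFlag (typo : List (String × String × Int × Int)) (pos : Nat) : Int :=
  match typo with
  | [] => 0
  | (_, _, start, «end») :: rest =>
    if start ≤ (pos : Int) ∧ (pos : Int) < «end» then 1 else pvAFlag rest pos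

-- A's outer loop over enumerate(text2token), appending at token level.
def pvALoop (typo : List (String × String × Int × Int)) :
    List (Option Int) → Nat → List Int → List Int
  | [], _, flags => flags
  | ti :: rest, pos, flags =>
    match ti with
    | none => pvALoop typo rest (pos + 1) flags
    | some tokenIndex =>
      let flag := pvAFlag typo pos
      pvALoop typo rest (pos + 1)
        (if (flags.length : Int) ≤ tokenIndex then flags ++ [flag] else flags)

def obtain_typo_flags_py (typo : List (String × String × Int × Int)) (text2token : List (Option Int)) : List Int :=
  pvALoop typo text2token 0 []

-- ===== PORT B =====
-- B: clamped difference array over the typo intervals.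
def pvBuildDiff (n : Nat) (typo : List (String × String × Int × Int)) : Array Int :=
  typo.foldl (fun diff t =>
    let lo := max t.2.2.1 0
    let hi := min t.2.2.2 (n : Int)
    if lo < hi then
      (diff.modify lo.toNat (· + 1)).modify hi.toNat (· - 1)
    else diff) (Array.replicate (n + 1) 0)

-- B's single sweep with a running coverage count.
def pvBLoop (diff : Array Int) :
    List (Option Int) → Nat → Int → List Int → List Int
  | [], _, _, flags => flags
  | ti :: rest, pos, cover, flags =>
    let cover' := cover + diff.getD pos 0
    match ti with
    | none => pvBLoop diff rest (pos + 1) cover' flags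
    | some tokenIndex =>
      pvBLoop diff rest (pos + 1) cover'
        (if (flags.length : Int) ≤ tokenIndex then
          flags ++ [if 0 < cover' then (1 : Int) else 0] else flags)

def obtain_typo_flags_py_alt (typo : List (String × String × Int × Int)) (text2token : List (Option Int)) : List Int :=
  pvBLoop (pvBuildDiff text2token.length typo) text2token 0 0 []

-- ===== PRECONDITION & SPEC =====
def Spec_obtain_typo_flags_py (typo : List (String × String × Int × Int)) (text2token : List (Option Int)) (out : List Int) : Prop := out = obtain_typo_flags_py_alt typo text2token
instance (typo : List (String × String × Int × Int)) (text2token : List (Option Int)) (out : List Int) : Decidable (Spec_obtain_typo_flags_py typo text2token out) := by unfold Spec_obtain_typo_flags_py; infer_instance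

-- ===== CLAIM (what is proved, stated in full; the proofs are below) =====
def Claim_equal_obtain_typo_flags_py : Prop := ∀ (typo : List (String × String × Int × Int)) (text2token : List (Option Int)), Dom_obtain_typo_flags_py typo text2token → Spec_obtain_typo_flags_py typo text2token (obtain_typo_flags_py typo text2token)

-- ===== LEMMAS AND PROOFS =====

-- number of typo intervals covering character position pos
def pvCnt (typo : List (String × String × Int × Int)) (pos : Nat) : Nat :=
  (typo.filter (fun t => decide (t.2.2.1 ≤ (pos : Int) ∧ (pos : Int) < t.2.2.2))).length

-- prefix sum of the first k entries of the difference array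
def pvPSum (a : Array Int) (k : Nat) : Int :=
  ∑ i ∈ Finset.range k, a.getD i 0

theorem pvAFlag_eq_cnt (typo : List (String × String × Int × Int)) (pos : Nat) :
    pvAFlag typo pos = if 0 < pvCnt typo pos then (1 : Int) else 0 := by
  induction typo with
  | nil => simp [pvAFlag, pvCnt]
  | cons t rest ih =>
    obtain ⟨w, c, s, e⟩ := t
    by_cases h : s ≤ (pos : Int) ∧ (pos : Int) < e
    · simp [pvAFlag, pvCnt, h]
    · have hf : (((w, c, s, e) : String × String × Int × Int) :: rest).filter
          (fun t => decide (t.2.2.1 ≤ (pos : Int) ∧ (pos : Int) < t.2.2.2)) =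
          rest.filter (fun t => decide (t.2.2.1 ≤ (pos : Int) ∧ (pos : Int) < t.2.2.2)) := by
        rw [List.filter_cons]
        simp [h]
      unfold pvCnt
      rw [hf]
      simp [pvAFlag, h, ih, pvCnt]

theorem pvPSum_modify (a : Array Int) (j : Nat) (c : Int) (k : Nat) (hj : j < a.size) :
    pvPSum (a.modify j (· + c)) k = pvPSum a k + (if j < k then c else 0) := by
  unfold pvPSum
  have hsize : (a.modify j (· + c)).size = a.size := by simp
  have key : ∀ i, (a.modify j (· + c)).getD i 0 = a.getD i 0 + (if i = j then c else 0) := by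
    intro i
    by_cases hi : i < a.size
    · by_cases hij : i = j
      · subst hij; simp [Array.getD, hsize, hi, Array.getElem_modify]
      · simp [Array.getD, hsize, hi, Array.getElem_modify, Ne.symm hij, hij]
    · have hij : i ≠ j := by omega
      simp [Array.getD, hsize, hi, hij]
  simp only [key, Finset.sum_add_distrib]
  congr 1
  simp [Finset.mem_range]

theorem pvStep_size (n : Nat) (a : Array Int) (t : String × String × Int × Int) :
    (let lo := max t.2.2.1 0
     let hi := min t.2.2.2 ((n : Nat) : Int)
     if lo < hi then (a.modify lo.toNat (· + 1)).modify hi.toNat (· - 1) else a).size = a.size := by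
  dsimp only
  split <;> simp

theorem pvCnt_cons (w c : String) (s e : Int) (rest : List (String × String × Int × Int)) (p : Nat) :
    pvCnt ((w, c, s, e) :: rest) p =
      (if s ≤ (p : Int) ∧ (p : Int) < e then 1 else 0) + pvCnt rest p := by
  unfold pvCnt
  rw [List.filter_cons]
  by_cases h : s ≤ (p : Int) ∧ (p : Int) < e
  · simp [h]; omega
  · simp [h]

theorem pvSub_eq_add_neg : (fun x : Int => x - 1) = (fun x : Int => x + (-1)) := by
  funext x; ring

theorem pvPSum_fold (n p : Nat) (hp : p < n) (typo : List (String × String × Int × Int))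
    (a : Array Int) (ha : a.size = n + 1) :
    pvPSum (typo.foldl (fun diff t =>
      let lo := max t.2.2.1 0
      let hi := min t.2.2.2 ((n : Nat) : Int)
      if lo < hi then (diff.modify lo.toNat (· + 1)).modify hi.toNat (· - 1) else diff) a) (p + 1)
      = pvPSum a (p + 1) + (pvCnt typo p : Int) := by
  induction typo generalizing a with
  | nil => simp [pvCnt]
  | cons t rest ih =>
    obtain ⟨w, c, s, e⟩ := t
    rw [List.foldl_cons]
    rw [ih _ (by rw [pvStep_size n a (w, c, s, e)]; exact ha)]
    rw [pvCnt_cons]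
    dsimp only
    by_cases hlh : max s 0 < min e ((n : Nat) : Int)
    · rw [if_pos hlh]
      have hlo' : (max s 0).toNat < a.size := by
        simp only [ha]; omega
      have hhi : (min e ((n : Nat) : Int)).toNat < (a.modify (max s 0).toNat (· + 1)).size := by
        simp only [Array.size_modify, ha]; omega
      rw [pvSub_eq_add_neg, pvPSum_modify _ _ _ _ hhi, pvPSum_modify _ _ _ _ hlo']
      have h1 : (max s 0).toNat < p + 1 ↔ s ≤ (p : Int) := by omega
      have h2 : (min e ((n : Nat) : Int)).toNat < p + 1 ↔ ¬ ((p : Int) < e) := by omega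
      by_cases hc : s ≤ (p : Int) ∧ (p : Int) < e
      · rw [if_pos hc, if_pos (h1.mpr hc.1), if_neg (fun hq => (h2.mp hq) hc.2)]
        push_cast; ring
      · rw [if_neg hc]
        rcases not_and_or.mp hc with hcl | hcr
        · rw [if_neg (by rw [h1]; exact hcl), if_neg (by rw [h2]; omega)]
          push_cast; ring
        · rw [if_pos (h2.mpr hcr)]
          by_cases hq : (max s 0).toNat < p + 1
          · rw [if_pos hq]; push_cast; ring
          · exact absurd hlh (by omega)
    · rw [if_neg hlh]
      have : ¬ (s ≤ (p : Int) ∧ (p : Int) < e) := by omega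
      rw [if_neg this]
      push_cast
      ring

theorem pvPSum_buildDiff (n : Nat) (typo : List (String × String × Int × Int)) (p : Nat) (hp : p < n) :
    pvPSum (pvBuildDiff n typo) (p + 1) = (pvCnt typo p : Int) := by
  unfold pvBuildDiff
  rw [pvPSum_fold n p hp typo _ (by simp)]
  have : pvPSum (Array.replicate (n + 1) (0 : Int)) (p + 1) = 0 := by
    unfold pvPSum
    apply Finset.sum_eq_zero
    intro i _
    simp [Array.getD]
  rw [this]; ring

theorem pvLoop_eq (typo : List (String × String × Int × Int)) (n : Nat)
    (rest : List (Option Int)) (pos : Nat) (flags : List Int)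
    (hlen : pos + rest.length = n) :
    pvBLoop (pvBuildDiff n typo) rest pos (pvPSum (pvBuildDiff n typo) pos) flags =
      pvALoop typo rest pos flags := by
  induction rest generalizing pos flags with
  | nil => rfl
  | cons ti rest ih =>
    have hpos : pos < n := by simp at hlen; omega
    have hcov : pvPSum (pvBuildDiff n typo) pos + (pvBuildDiff n typo).getD pos 0 =
        pvPSum (pvBuildDiff n typo) (pos + 1) := by
      unfold pvPSum
      rw [Finset.sum_range_succ]
    have hflag : (if 0 < pvPSum (pvBuildDiff n typo) (pos + 1) then (1 : Int) else 0) =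
        pvAFlag typo pos := by
      rw [pvPSum_buildDiff n typo pos hpos, pvAFlag_eq_cnt]
      by_cases h : 0 < pvCnt typo pos
      · rw [if_pos h, if_pos (by exact_mod_cast h)]
      · rw [if_neg h, if_neg (by exact_mod_cast h)]
    cases ti with
    | none =>
      show pvBLoop _ rest (pos + 1) (pvPSum (pvBuildDiff n typo) pos + (pvBuildDiff n typo).getD pos 0) flags = pvALoop typo rest (pos + 1) flags
      rw [hcov, ih (pos + 1) flags (by simp at hlen ⊢; omega)]
    | some tokenIndex =>
      show pvBLoop _ rest (pos + 1) _ _ = pvALoop typo rest (pos + 1) _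
      rw [hcov, hflag, ih (pos + 1) _ (by simp at hlen ⊢; omega)]

theorem obtain_typo_flags_py_spec : Claim_equal_obtain_typo_flags_py := by
  intro typo text2token _
  unfold Spec_obtain_typo_flags_py obtain_typo_flags_py obtain_typo_flags_py_alt
  have h := pvLoop_eq typo text2token.length text2token 0 [] (by simp)
  rw [← h]
  simp [pvPSum]

-- ===== VERDICT (by name: the statement is the Claim_ definition above) =====
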